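-- pv_equiv track=rewrite | github.com/BlockXAI/Canton_Ginie | backend/agents/fix_agent.py | _strip_sdk_banner
-- ===== SOURCE A (Python) =====
-- def _strip_sdk_banner(text: str) -> str:
--     lines = text.split("\n")
--     result = []
--     skip = True
--     for line in lines:
--         if skip and ("SDK" in line or "github.com" in line or "Running single" in line
--                      or "[INFO]" in line or "Compiling" in line or line.strip() == ""):
--             continue
--         skip = False
--         result.append(line)
--     return "\n".join(result) if result else text
-- ===== SOURCE B (Python) =====
-- def _is_banner(line):
--     return ("SDK" in line or "github.com" in line or "Running single" in line
--             or "[INFO]" in line or "Compiling" in line or line.strip() == "")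
--
--
-- def _strip_sdk_banner(text: str) -> str:
--     # Peel one line at a time off the front of the string with partition and
--     # return the remaining suffix directly; no line list is ever built.
--     rest = text
--     while True:
--         line, sep, tail = rest.partition("\n")
--         if not _is_banner(line):
--             return rest
--         if not sep:
--             return text
--         rest = tail
-- ===== Notes on version B (the rewrite author's own statement) =====
-- stated objective: alternative
-- what changed: Instead of splitting the whole text into a list of lines and re-joining the accumulated survivors, B peels one line at a time off the front of the string with str.partition and returns the remaining suffix of the original string directly (no line list, no join), falling back to the original text when every line is banner.
import Mathlib
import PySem

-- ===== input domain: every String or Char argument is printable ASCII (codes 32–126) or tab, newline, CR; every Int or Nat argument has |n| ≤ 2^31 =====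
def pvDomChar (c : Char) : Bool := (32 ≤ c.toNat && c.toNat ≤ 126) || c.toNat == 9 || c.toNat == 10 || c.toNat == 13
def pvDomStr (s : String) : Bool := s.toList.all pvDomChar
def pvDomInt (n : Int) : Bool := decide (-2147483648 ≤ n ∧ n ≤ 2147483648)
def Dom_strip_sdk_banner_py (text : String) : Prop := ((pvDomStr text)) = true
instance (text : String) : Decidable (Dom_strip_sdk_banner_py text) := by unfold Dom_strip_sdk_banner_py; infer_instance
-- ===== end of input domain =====

-- B replaces A's split-filter-join line list by peeling lines off the string front
-- with partition and returning the remaining suffix directly; equivalence on all inputs.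

-- ===== PORT A =====
-- Port of A: split into lines, latch flag `skip`, accumulate, join or fall back to text.
def pvIsBanner (line : List Char) : Bool :=
  PySem.Chars.isIn "SDK".toList line || PySem.Chars.isIn "github.com".toList line ||
  PySem.Chars.isIn "Running single".toList line || PySem.Chars.isIn "[INFO]".toList line ||
  PySem.Chars.isIn "Compiling".toList line || (PySem.Chars.strip line == [])

def strip_sdk_banner_py (text : String) : String :=
  let lines := PySem.Chars.splitOn text.toList ['\n']
  let st := lines.foldl (fun (s : Bool × List (List Char)) line =>
    if s.1 && pvIsBanner line then s
    else (false, s.2 ++ [line])) (true, [])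
  if st.2 ≠ [] then String.ofList (PySem.Chars.join ['\n'] st.2) else text

-- ===== PORT B =====
-- Port of B: rest.partition('\n') = (takeWhile (≠ '\n'), sep?, tail); loop on the suffix.
def pvAltGo (orig : List Char) (rest : List Char) : List Char :=
  if !pvIsBanner (rest.takeWhile (fun c => c != '\n')) then rest
  else
    match hd : rest.dropWhile (fun c => c != '\n') with
    | [] => orig                     -- sep empty: no '\n' left
    | _ :: tail => pvAltGo orig tail
termination_by rest.length
decreasing_by
  have h := List.length_dropWhile_le (p := fun c => c != '\n') (l := rest)
  rw [hd] at h; simp at h; omega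

def strip_sdk_banner_py_alt (text : String) : String :=
  String.ofList (pvAltGo text.toList text.toList)

-- ===== PRECONDITION & SPEC =====
def Spec_strip_sdk_banner_py (text : String) (out : String) : Prop := out = strip_sdk_banner_py_alt text
instance (text : String) (out : String) : Decidable (Spec_strip_sdk_banner_py text out) := by unfold Spec_strip_sdk_banner_py; infer_instance

-- ===== CLAIM (what is proved, stated in full; the proofs are below) =====
def Claim_equal_strip_sdk_banner_py : Prop := ∀ (text : String), Dom_strip_sdk_banner_py text → Spec_strip_sdk_banner_py text (strip_sdk_banner_py text)

-- ===== LEMMAS AND PROOFS =====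

-- PySem's splitOn with the single-char separator '\n' is Mathlib's List.splitOn '\n'.
theorem pvSplitOn_go (fuel : Nat) : ∀ (l cur : List Char) (acc : List (List Char)),
    l.length < fuel →
    PySem.Chars.splitOn.go ['\n'] fuel l cur acc
      = acc.reverse ++ (l.splitOn '\n').modifyHead (cur.reverse ++ ·) := by
  induction fuel with
  | zero => intro l cur acc h; omega
  | succ f ih =>
    intro l cur acc h
    match l with
    | [] =>
      rw [PySem.Chars.splitOn.go]
      · simp [List.splitOn]
      · omega
    | c :: rest =>
      by_cases hc : c = '\n'
      · subst hc
        rw [PySem.Chars.splitOn.go]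
        rw [if_pos (by simp [List.isPrefixOf])]
        rw [show List.drop ['\n'].length ('\n' :: rest) = rest from rfl]
        rw [ih rest [] ((cur.reverse) :: acc) (by simp at h; omega)]
        have hs : (('\n') :: rest).splitOn '\n' = [] :: rest.splitOn '\n' := by
          simp [List.splitOn]
        rw [hs]
        cases hr : rest.splitOn '\n' <;> simp [List.modifyHead]
      · rw [PySem.Chars.splitOn.go]
        rw [if_neg (by simp [List.isPrefixOf]; exact fun hh => absurd hh.symm hc)]
        rw [ih rest (c :: cur) acc (by simp at h; omega)]
        have hs : (c :: rest).splitOn '\n'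
            = (rest.splitOn '\n').modifyHead (c :: ·) := by
          simp [List.splitOn, List.splitOnP_cons, hc]
        rw [hs]
        cases hr : rest.splitOn '\n' <;> simp [List.modifyHead]

theorem pvSplitOn_eq (l : List Char) :
    PySem.Chars.splitOn l ['\n'] = l.splitOn '\n' := by
  rw [PySem.Chars.splitOn, pvSplitOn_go (l.length + 1) l [] [] (by omega)]
  cases hr : l.splitOn '\n' <;> simp [List.modifyHead]

-- Head/tail characterisation of splitOn '\n' in partition terms.
theorem pvSplitOn_cons_eq (l : List Char) :
    l.splitOn '\n' = l.takeWhile (fun c => c != '\n') ::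
      (match l.dropWhile (fun c => c != '\n') with
       | [] => []
       | _ :: tail => tail.splitOn '\n') := by
  induction l with
  | nil => simp
  | cons c rest ih =>
    by_cases hc : c = '\n'
    · subst hc
      simp [List.splitOn, List.splitOnP_cons]
    · have hs : (c :: rest).splitOn '\n'
          = (rest.splitOn '\n').modifyHead (c :: ·) := by
        simp [List.splitOn, List.splitOnP_cons, hc]
      rw [hs, ih]
      simp [hc, List.modifyHead]

-- Once the latch is off (skip = false), A's loop appends every remaining line.
theorem pvFold_false (l : List (List Char)) (acc : List (List Char)) :
    l.foldl (fun (s : Bool × List (List Char)) line =>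
      if s.1 && pvIsBanner line then s else (false, s.2 ++ [line])) (false, acc)
    = (false, acc ++ l) := by
  induction l generalizing acc with
  | nil => simp
  | cons x xs ih => simpa [List.foldl] using ih (acc ++ [x])

-- A's loop from the initial state computes dropWhile of the banner predicate.
theorem pvFold_dropWhile (l : List (List Char)) :
    (l.foldl (fun (s : Bool × List (List Char)) line =>
      if s.1 && pvIsBanner line then s else (false, s.2 ++ [line])) (true, [])).2
    = l.dropWhile pvIsBanner := by
  induction l with
  | nil => simp
  | cons x xs ih =>
    by_cases h : pvIsBanner x
    · rw [List.foldl_cons, if_pos (by simp [h]), List.dropWhile_cons_of_pos h]; exact ih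
    · rw [List.foldl_cons, if_neg (by simp [h]), pvFold_false, List.dropWhile_cons_of_neg h]
      simp

-- B's suffix loop equals A's join-or-fallback over the dropped line list.
theorem pvAltGo_spec (orig l : List Char) :
    pvAltGo orig l
      = if (l.splitOn '\n').dropWhile pvIsBanner ≠ [] then
          PySem.Chars.join ['\n'] ((l.splitOn '\n').dropWhile pvIsBanner)
        else orig := by
  rw [pvAltGo, pvSplitOn_cons_eq l]
  by_cases hb : pvIsBanner (l.takeWhile (fun c => c != '\n'))
  · rw [if_neg (by simp [hb])]
    cases hd : l.dropWhile (fun c => c != '\n') with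
    | nil => simp [List.dropWhile_cons_of_pos hb]
    | cons c tail =>
      rw [List.dropWhile_cons_of_pos hb]
      exact pvAltGo_spec orig tail
  · rw [if_pos (by simp [hb])]
    have hj : PySem.Chars.join ['\n'] (l.splitOn '\n') = l := by
      simpa [PySem.Chars.join] using List.intercalate_splitOn (xs := l) '\n'
    rw [pvSplitOn_cons_eq l] at hj
    rw [List.dropWhile_cons_of_neg (by simpa using hb), if_pos (by simp)]
    exact hj.symm
termination_by l.length
decreasing_by
  have h := List.length_dropWhile_le (p := fun c => c != '\n') (l := l)
  rw [hd] at h; simp at h; omega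

-- ===== VERDICT (by name: the statement is the Claim_ definition above) =====
theorem strip_sdk_banner_py_spec : Claim_equal_strip_sdk_banner_py := by
  intro text _
  show strip_sdk_banner_py text = strip_sdk_banner_py_alt text
  simp only [strip_sdk_banner_py, strip_sdk_banner_py_alt, pvSplitOn_eq, pvFold_dropWhile,
    pvAltGo_spec]
  by_cases h : (text.toList.splitOn '\n').dropWhile pvIsBanner = []
  · simp [h]
  · simp [h]
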